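-- pv_equiv track=rewrite | github.com/bpnsingh/practice | scaler/Queue/1,2,3 integers.py | solve
-- ===== SOURCE A (Python) =====
-- from collections import deque
--
-- class Queue:
--     def __init__(self,array_list):
--         self.buffer = deque(array_list)
--     def print_items(self):
--         if len(self.buffer) == 0:
--             print ("Queue is empty")
--             return
--         for each in self.buffer:
--             print (each,end=' ')
--         print ()
--     def add(self,val):
--         self.buffer.append(val)
--     def remove(self):
--         return self.buffer.popleft()
--     def front(self):
--         return self.buffer[0]
--
-- def solve(A):
--     res = []
--     Q = Queue([1,2,3])
--     while len(res) < A: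
--         temp = Q.remove()
--         res.append(temp)
--         Q.add((temp*10)+1)
--         Q.add((temp * 10) + 2)
--         Q.add((temp * 10) + 3)
--     return res
-- ===== SOURCE B (Python) =====
-- def solve(A):
--     res = []
--     for i in range(1, A + 1):
--         num = 0
--         mult = 1
--         while i:
--             num += (((i - 1) % 3) + 1) * mult
--             mult *= 10
--             i = (i - 1) // 3
--         res.append(num)
--     return res
-- ===== Notes on version B (the rewrite author's own statement) =====
-- stated objective: alternative
-- what changed: Replaces the BFS queue with a closed form: the k-th output is k written in bijective base 3 with digits 1,2,3, computed per index with no queue.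
import Mathlib
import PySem

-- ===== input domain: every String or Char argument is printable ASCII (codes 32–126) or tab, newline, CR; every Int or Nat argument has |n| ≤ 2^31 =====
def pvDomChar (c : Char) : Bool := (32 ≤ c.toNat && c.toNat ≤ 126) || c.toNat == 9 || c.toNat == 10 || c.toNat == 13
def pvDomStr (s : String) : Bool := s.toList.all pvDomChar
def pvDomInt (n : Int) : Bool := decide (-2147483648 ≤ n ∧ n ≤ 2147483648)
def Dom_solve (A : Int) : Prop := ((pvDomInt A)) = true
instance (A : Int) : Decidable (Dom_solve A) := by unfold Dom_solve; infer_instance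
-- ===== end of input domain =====

-- B replaces A's BFS queue by a per-index closed form (bijective base-3 with digits 1,2,3); alternative decomposition, same output.

-- ===== PORT A =====
-- The while loop: each iteration appends one element to res, so it runs exactly
-- A.toNat times; fuel = A.toNat only makes the recursion total, the `if` is the
-- Python condition `len(res) < A`.  The `[]` queue branch is unreachable (the
-- queue starts with 3 elements and each step removes 1 and adds 3).
def solveLoop (A : Int) (res Q : List Int) : Nat → List Int
  | 0 => res
  | n+1 =>
    if (res.length : Int) < A then
      match Q with
      | [] => res
      | t :: rest => solveLoop A (res ++ [t]) (rest ++ [t*10+1, t*10+2, t*10+3]) n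
    else res

def solve (A : Int) : List Int := solveLoop A [] [1, 2, 3] A.toNat

-- ===== PORT B =====
-- Inner while loop of Source B: `while i: num += (((i-1)%3)+1)*mult; mult *= 10; i = (i-1)//3`.
-- i is always ≥ 1 here (it comes from range(1, A+1)), so Nat division matches Python's //.
def bijLoop (i : Nat) (num mult : Int) : Int :=
  if h : i = 0 then num
  else bijLoop ((i - 1) / 3) (num + (((i - 1) % 3 : Nat) + 1) * mult) (mult * 10)
  termination_by i
  decreasing_by exact Nat.lt_of_le_of_lt (Nat.div_le_self _ _) (by omega)

-- `for i in range(1, A+1): … res.append(num)` as a fold over the range.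
def solve_alt (A : Int) : List Int :=
  (PySem.List.pyRange 1 (A + 1) 1).foldl (fun res i => res ++ [bijLoop i.toNat 0 1]) []

-- ===== PRECONDITION & SPEC =====
def Spec_solve (A : Int) (out : List Int) : Prop := out = solve_alt A
instance (A : Int) (out : List Int) : Decidable (Spec_solve A out) := by unfold Spec_solve; infer_instance

-- ===== CLAIM (what is proved, stated in full; the proofs are below) =====
def Claim_equal_solve : Prop := ∀ (A : Int), Dom_solve A → Spec_solve A (solve A)

-- ===== LEMMAS AND PROOFS =====

-- the mathematical closed form: index k ≥ 1 written in bijective base 3 with digits 1,2,3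
def bijN : Nat → Int
  | 0 => 0
  | (i+1) => bijN (i / 3) * 10 + ((i % 3 : Nat) + 1)
  termination_by i => i
  decreasing_by exact Nat.lt_of_le_of_lt (Nat.div_le_self _ _) (by omega)

lemma bijN_zero : bijN 0 = 0 := by rw [bijN]

lemma bijN_succ (i : Nat) : bijN (i+1) = bijN (i / 3) * 10 + ((i % 3 : Nat) + 1) := by rw [bijN]

lemma bijLoop_eq : ∀ (i : Nat) (num mult : Int), bijLoop i num mult = num + bijN i * mult := by
  intro i
  induction i using Nat.strong_induction_on with
  | _ i ih =>
    intro num mult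
    match i with
    | 0 => simp [bijLoop, bijN]
    | (j+1) =>
      rw [bijLoop]
      simp only [Nat.add_sub_cancel]
      rw [ih (j / 3) (Nat.lt_of_le_of_lt (Nat.div_le_self _ _) (by omega))]
      rw [show bijN (j+1) = bijN (j / 3) * 10 + ((j % 3 : Nat) + 1) from by rw [bijN]]
      push_cast
      ring

lemma bij_child (k j : Nat) (hj : j < 3) :
    bijN (3*k + 4 + j) = bijN (k+1) * 10 + (j + 1 : Int) := by
  have h1 : 3*k + 4 + j = (3*k + 3 + j) + 1 := by omega
  rw [h1, bijN, show (3*k + 3 + j) / 3 = k + 1 from by omega,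
      show (3*k + 3 + j) % 3 = j from by omega]

lemma solveLoop_step (A : Int) (res : List Int) (t : Int) (rest : List Int) (n : Nat)
    (h : (res.length : Int) < A) :
    solveLoop A res (t :: rest) (n+1)
      = solveLoop A (res ++ [t]) (rest ++ [t*10+1, t*10+2, t*10+3]) n := by
  rw [show solveLoop A res (t :: rest) (n+1)
      = if (res.length : Int) < A then
          solveLoop A (res ++ [t]) (rest ++ [t*10+1, t*10+2, t*10+3]) n
        else res from rfl, if_pos h]

lemma loop_inv (A : Int) : ∀ (n k : Nat), (n : Int) + k = A →
    solveLoop A ((List.range k).map (fun i => bijN (i+1)))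
      ((List.range (2*k+3)).map (fun i => bijN (k+1+i))) n
    = (List.range A.toNat).map (fun i => bijN (i+1)) := by
  intro n
  induction n with
  | zero =>
    intro k hk
    have : k = A.toNat := by omega
    subst this
    rfl
  | succ n ih =>
    intro k hk
    have hcond : (((List.range k).map (fun i => bijN (i+1))).length : Int) < A := by
      simp; omega
    have hQ : (List.range (2*k+3)).map (fun i => bijN (k+1+i))
        = bijN (k+1) :: (List.range (2*k+2)).map (fun i => bijN (k+2+i)) := by
      rw [show 2*k+3 = (2*k+2)+1 from rfl, List.range_succ_eq_map]
      simp [List.map_map, Function.comp_def]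
      intro a _
      congr 1
      omega
    rw [hQ, solveLoop_step A _ _ _ n hcond]
    have hres : (List.range k).map (fun i => bijN (i+1)) ++ [bijN (k+1)]
        = (List.range (k+1)).map (fun i => bijN (i+1)) := by
      rw [List.range_succ, List.map_append]; rfl
    have hnewQ : (List.range (2*k+2)).map (fun i => bijN (k+2+i))
          ++ [bijN (k+1)*10+1, bijN (k+1)*10+2, bijN (k+1)*10+3]
        = (List.range (2*(k+1)+3)).map (fun i => bijN ((k+1)+1+i)) := by
      symm
      conv_lhs => rw [show 2*(k+1)+3 = ((2*k+2)+1+1)+1 from by ring,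
        List.range_succ, List.range_succ, List.range_succ]
      simp only [List.map_append, List.map_cons, List.map_nil, List.append_assoc,
        List.cons_append, List.nil_append]
      congr 1
      rw [show k+1+1+(2*k+2) = 3*k+4+0 from by omega,
          show k+1+1+(2*k+3) = 3*k+4+1 from by omega,
          show k+1+1+(2*k+4) = 3*k+4+2 from by omega,
          bij_child k 0 (by omega), bij_child k 1 (by omega), bij_child k 2 (by omega)]
      norm_num
    rw [hres, hnewQ]
    exact ih (k+1) (by push_cast; push_cast at hk; omega)

lemma foldl_append_map (f : Int → Int) : ∀ (l : List Int) (acc : List Int),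
    l.foldl (fun res i => res ++ [f i]) acc = acc ++ l.map f := by
  intro l
  induction l with
  | nil => simp
  | cons x xs ih => intro acc; simp [List.foldl, ih, List.append_assoc]

lemma solve_alt_eq (A : Int) :
    solve_alt A = (List.range A.toNat).map (fun i => bijN (i+1)) := by
  unfold solve_alt
  rw [PySem.List.pyRange_one, foldl_append_map, List.nil_append,
      show A + 1 - 1 = A from by ring, List.map_map]
  apply List.map_congr_left
  intro a _
  simp only [Function.comp_def]
  rw [bijLoop_eq, show ((1 : Int) + (a : Int)).toNat = a + 1 from by omega]
  ring

-- ===== VERDICT (by name: the statement is the Claim_ definition above) =====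
theorem solve_spec : Claim_equal_solve := by
  intro A _
  unfold Spec_solve
  rw [solve_alt_eq]
  unfold solve
  by_cases hA : 0 < A
  · have h0 : ([] : List Int) = (List.range 0).map (fun i => bijN (i+1)) := rfl
    have b1 : bijN 1 = 1 := by
      rw [show (1:Nat) = 0+1 from rfl, bijN_succ]; norm_num [bijN_zero]
    have b2 : bijN 2 = 2 := by
      rw [show (2:Nat) = 1+1 from rfl, bijN_succ]; norm_num [bijN_zero]
    have b3 : bijN 3 = 3 := by
      rw [show (3:Nat) = 2+1 from rfl, bijN_succ]; norm_num [bijN_zero]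
    have h1 : ([1, 2, 3] : List Int)
        = (List.range (2*0+3)).map (fun i => bijN (0+1+i)) := by
      norm_num [List.range_succ, b1, b2, b3]
    rw [h1, h0]
    exact loop_inv A A.toNat 0 (by omega)
  · have h1 : A.toNat = 0 := by omega
    rw [h1]
    rfl
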